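-- pv_equiv track=rewrite | github.com/ashzak/nim-audit | src/nim_audit/core/env/cel.py | _replace_not
-- ===== SOURCE A (Python) =====
-- def _replace_not(expr: str) -> str:
--     """Replace CEL '!' with Python 'not', but keep '!='."""
--     out = []
--     i = 0
--     while i < len(expr):
--         ch = expr[i]
--         if ch == "!" and (i + 1 >= len(expr) or expr[i + 1] != "="):
--             out.append("not ")
--             i += 1
--             continue
--         out.append(ch)
--         i += 1
--     return "".join(out)
-- ===== SOURCE B (Python) =====
-- def _replace_not(expr: str) -> str:
--     """Replace CEL '!' with Python 'not', but keep '!='."""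
--     parts = expr.split("!=")
--     return "!=".join(p.replace("!", "not ") for p in parts)
-- ===== Notes on version B (the rewrite author's own statement) =====
-- stated objective: faster
-- what changed: Replaces the index-based character state machine with a split-on-'!=' / per-segment str.replace('!', 'not ') / rejoin-with-'!=' pipeline, moving the per-character work into C-level string methods.
import Mathlib
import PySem

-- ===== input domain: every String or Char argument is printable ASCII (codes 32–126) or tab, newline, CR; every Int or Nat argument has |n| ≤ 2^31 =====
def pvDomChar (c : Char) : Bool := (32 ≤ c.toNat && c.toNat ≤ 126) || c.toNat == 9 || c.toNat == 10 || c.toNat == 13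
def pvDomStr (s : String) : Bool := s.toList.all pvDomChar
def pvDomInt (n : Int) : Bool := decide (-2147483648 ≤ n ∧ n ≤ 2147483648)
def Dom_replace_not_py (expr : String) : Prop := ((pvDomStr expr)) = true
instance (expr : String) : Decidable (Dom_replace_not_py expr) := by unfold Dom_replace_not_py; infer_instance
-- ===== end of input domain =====

-- B replaces A's index-based one-character-lookahead scan by a split-on-"!=" /
-- per-segment replace("!", "not ") / rejoin-with-"!=" pipeline (objective: faster; a timing run measured B faster at the largest size).

-- ===== PORT A =====
-- A's while loop over indices, as the obvious structural recursion: the remaining suffix is the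
-- state, the lookahead expr[i+1] becomes rest.head?, and `out` is the list of appended pieces.
def pyGoA : List Char → List (List Char)
  | [] => []
  | c :: rest =>
    if c = '!' ∧ rest.head? ≠ some '=' then "not ".toList :: pyGoA rest
    else [c] :: pyGoA rest

def replace_not_py (expr : String) : String :=
  String.ofList (PySem.Chars.join [] (pyGoA expr.toList))   -- "".join(out)

-- ===== PORT B =====
-- Source B: parts = expr.split("!="); return "!=".join(p.replace("!", "not ") for p in parts)
def replace_not_py_alt (expr : String) : String :=
  String.ofList (PySem.Chars.join "!=".toList
    ((PySem.Chars.splitOn expr.toList "!=".toList).map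
      (fun p => PySem.Chars.replace p "!".toList "not ".toList)))

-- ===== PRECONDITION & SPEC =====
def Spec_replace_not_py (expr : String) (out : String) : Prop := out = replace_not_py_alt expr
instance (expr : String) (out : String) : Decidable (Spec_replace_not_py expr out) := by unfold Spec_replace_not_py; infer_instance

-- ===== CLAIM (what is proved, stated in full; the proofs are below) =====
def Claim_equal_replace_not_py : Prop := ∀ (expr : String), Dom_replace_not_py expr → Spec_replace_not_py expr (replace_not_py expr)

-- ===== LEMMAS AND PROOFS =====

-- cons a prefix onto the first piece of a piece list
def consHead (pre : List Char) : List (List Char) → List (List Char)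
  | [] => [pre]
  | p :: ps => (pre ++ p) :: ps

-- recursive characterisation of expr.split("!=")
def specSplit : List Char → List (List Char)
  | [] => [[]]
  | c :: t =>
    if c = '!' ∧ t.head? = some '=' then [] :: specSplit t.tail
    else consHead [c] (specSplit t)
termination_by l => l.length
decreasing_by
  · simp only [List.length_cons, List.length_tail]; omega
  · simp only [List.length_cons]; omega

-- recursive characterisation of p.replace("!", "not ")
def specRepl : List Char → List Char
  | [] => []
  | c :: t => (if c = '!' then "not ".toList else [c]) ++ specRepl t

lemma consHead_ne_nil (pre : List Char) (ps : List (List Char)) : consHead pre ps ≠ [] := by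
  cases ps <;> simp [consHead]

lemma specSplit_ne_nil (l : List Char) : specSplit l ≠ [] := by
  cases l with
  | nil => simp [specSplit]
  | cons c t =>
    rw [specSplit]
    split_ifs
    · simp
    · exact consHead_ne_nil _ _

lemma consHead_nil (ps : List (List Char)) (h : ps ≠ []) : consHead [] ps = ps := by
  cases ps with
  | nil => exact absurd rfl h
  | cons p q => simp [consHead]

lemma isPrefix_ne : ∀ (c : Char) (rest : List Char), ¬(c = '!' ∧ rest.head? = some '=') →
    List.isPrefixOf "!=".toList (c :: rest) = false := by
  intro c rest h
  cases rest <;> simp_all [List.isPrefixOf] <;> tauto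

lemma splitOn_go_spec : ∀ (fuel : Nat) (l cur : List Char) (acc : List (List Char)),
    l.length ≤ fuel →
    PySem.Chars.splitOn.go "!=".toList fuel l cur acc
      = acc.reverse ++ consHead cur.reverse (specSplit l) := by
  intro fuel
  induction fuel with
  | zero =>
    intro l cur acc h
    have : l = [] := List.length_eq_zero_iff.mp (Nat.le_zero.mp h)
    subst this
    rw [PySem.Chars.splitOn.go]
    simp [specSplit, consHead]
  | succ n ih =>
    intro l cur acc h
    cases l with
    | nil =>
      rw [PySem.Chars.splitOn.go]
      simp [specSplit, consHead]
      omega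
    | cons c rest =>
      rw [PySem.Chars.splitOn.go]
      by_cases hc : c = '!' ∧ rest.head? = some '='
      · obtain ⟨hc1, hc2⟩ := hc
        cases rest with
        | nil => simp at hc2
        | cons d t =>
          simp at hc2
          subst hc1; subst hc2
          have hpre : List.isPrefixOf "!=".toList ('!' :: '=' :: t) = true := by
            simp [List.isPrefixOf]
          rw [hpre]
          simp only [if_true]
          rw [ih (List.drop "!=".toList.length ('!' :: '=' :: t)) [] (cur.reverse :: acc)
            (by simp at h ⊢; omega)]
          rw [specSplit]
          rw [if_pos ⟨rfl, rfl⟩]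
          have hdrop : List.drop "!=".toList.length ('!' :: '=' :: t) = t := rfl
          rw [hdrop]
          cases hs : specSplit t with
          | nil => exact absurd hs (specSplit_ne_nil t)
          | cons p ps => simp [hs, consHead]
      · rw [isPrefix_ne c rest hc]
        simp only [Bool.false_eq_true, if_false]
        rw [ih rest (c :: cur) acc (by simpa using Nat.le_of_succ_le_succ h)]
        rw [specSplit]
        rw [if_neg hc]
        congr 1
        cases hs : specSplit rest with
        | nil => exact absurd hs (specSplit_ne_nil rest)
        | cons p ps => simp [consHead]

lemma splitOn_spec (l : List Char) :
    PySem.Chars.splitOn l "!=".toList = specSplit l := by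
  rw [PySem.Chars.splitOn]
  rw [splitOn_go_spec (l.length + 1) l [] [] (by omega)]
  simp [consHead_nil _ (specSplit_ne_nil l)]

lemma replace_go_spec : ∀ (fuel : Nat) (l acc : List Char),
    l.length ≤ fuel →
    PySem.Chars.replace.go "!".toList "not ".toList fuel l acc
      = acc.reverse ++ specRepl l := by
  intro fuel
  induction fuel with
  | zero =>
    intro l acc h
    have : l = [] := List.length_eq_zero_iff.mp (Nat.le_zero.mp h)
    subst this
    rw [PySem.Chars.replace.go]
    simp [specRepl]
  | succ n ih =>
    intro l acc h
    cases l with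
    | nil =>
      rw [PySem.Chars.replace.go]
      simp [specRepl]
      omega
    | cons c t =>
      rw [PySem.Chars.replace.go]
      by_cases hc : c = '!'
      · subst hc
        have hpre : List.isPrefixOf "!".toList ('!' :: t) = true := by
          simp [List.isPrefixOf]
        rw [hpre]
        simp only [if_true]
        have hdrop : List.drop "!".toList.length ('!' :: t) = t := rfl
        rw [hdrop]
        rw [ih t ("not ".toList.reverse ++ acc) (by simp at h ⊢; omega)]
        simp [specRepl]
      · have hpre : List.isPrefixOf "!".toList (c :: t) = false := by
          simp [List.isPrefixOf]; exact fun hh => absurd hh.symm hc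
        rw [hpre]
        simp only [Bool.false_eq_true, if_false]
        rw [ih t (c :: acc) (by simp at h ⊢; omega)]
        simp [specRepl, hc]

lemma replace_spec (p : List Char) :
    PySem.Chars.replace p "!".toList "not ".toList = specRepl p := by
  rw [PySem.Chars.replace]
  simp only [List.isEmpty_iff]
  rw [if_neg (by simp)]
  rw [replace_go_spec p.length p [] le_rfl]
  simp

lemma joinNil : ∀ (xs : List (List Char)), PySem.Chars.join [] xs = xs.flatten := by
  intro xs
  induction xs with
  | nil => simp [PySem.Chars.join_nil]
  | cons p ps ih =>
    cases ps with
    | nil => simp [PySem.Chars.join_singleton]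
    | cons q qs => rw [PySem.Chars.join_cons_cons]; simp_all

lemma main_spec : ∀ (n : Nat) (l : List Char), l.length ≤ n →
    PySem.Chars.join [] (pyGoA l)
      = PySem.Chars.join "!=".toList ((specSplit l).map specRepl) := by
  intro n
  induction n with
  | zero =>
    intro l h
    have : l = [] := List.length_eq_zero_iff.mp (Nat.le_zero.mp h)
    subst this
    simp [pyGoA, specSplit, specRepl, PySem.Chars.join_nil, PySem.Chars.join_singleton]
  | succ n ih =>
    intro l h
    cases l with
    | nil => simp [pyGoA, specSplit, specRepl, PySem.Chars.join_nil, PySem.Chars.join_singleton]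
    | cons c t =>
      by_cases hc : c = '!' ∧ t.head? = some '='
      · obtain ⟨hc1, hc2⟩ := hc
        cases t with
        | nil => simp at hc2
        | cons d t' =>
          simp at hc2
          subst hc1; subst hc2
          rw [specSplit, if_pos ⟨rfl, rfl⟩]
          have h1 : pyGoA ('!' :: '=' :: t') = ['!'] :: ['='] :: pyGoA t' := by
            rw [pyGoA, if_neg (by simp), pyGoA, if_neg (by simp)]
          rw [h1]
          rw [joinNil]
          simp only [List.flatten_cons, List.tail_cons]
          rw [← joinNil (pyGoA t')]
          rw [ih t' (by simp at h; omega)]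
          cases hs : specSplit t' with
          | nil => exact absurd hs (specSplit_ne_nil t')
          | cons q qs =>
            simp only [List.map_cons]
            rw [PySem.Chars.join_cons_cons]
            simp [specRepl]
      · rw [specSplit, if_neg hc]
        have hpiece : pyGoA (c :: t)
            = (if c = '!' then "not ".toList else [c]) :: pyGoA t := by
          by_cases h1 : c = '!'
          · subst h1
            rw [pyGoA, if_pos ⟨rfl, fun hh => hc ⟨rfl, by simpa using hh⟩⟩]
            simp
          · rw [pyGoA, if_neg (by tauto)]
            simp [h1]
        rw [hpiece, joinNil]
        simp only [List.flatten_cons]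
        rw [← joinNil (pyGoA t)]
        rw [ih t (by simp at h; omega)]
        cases hs : specSplit t with
        | nil => exact absurd hs (specSplit_ne_nil t)
        | cons p ps =>
          simp only [consHead, List.map_cons]
          cases ps with
          | nil =>
            simp only [List.map_nil]
            rw [PySem.Chars.join_singleton, PySem.Chars.join_singleton]
            simp [specRepl]
          | cons q qs =>
            simp only [List.map_cons]
            rw [PySem.Chars.join_cons_cons, PySem.Chars.join_cons_cons]
            simp [specRepl]

-- ===== VERDICT (by name: the statement is the Claim_ definition above) =====
theorem replace_not_py_spec : Claim_equal_replace_not_py := by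
  intro expr _
  unfold Spec_replace_not_py replace_not_py replace_not_py_alt
  rw [splitOn_spec]
  congr 1
  rw [main_spec expr.toList.length expr.toList le_rfl]
  congr 1
  exact List.map_congr_left (fun p _ => replace_spec p) |>.symm
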